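-- pv_equiv track=rewrite | github.com/Mosalah992/PlagueMonitor | orchestrator/siem.py | _canonical_parent_map
-- ===== SOURCE A (Python) =====
-- from collections import Counter, defaultdict, deque
-- from typing import Any, Dict, List, Optional, Sequence, Tuple
--
-- def _stable_text(value: Any) -> str:
--     if value in (None, ""):
--         return ""
--     return str(value)
--
-- def _canonical_parent_map(events: Sequence[Dict[str, Any]]) -> Dict[str, str]:
--     parent_counts: Dict[str, Counter[str]] = defaultdict(Counter)
--     first_seen: Dict[Tuple[str, str], str] = {}
--     for event in events:
--         child = _stable_text(event.get("payload_hash"))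
--         parent = _stable_text(event.get("parent_payload_hash"))
--         if not child or not parent:
--             continue
--         parent_counts[child][parent] += 1
--         first_seen.setdefault((child, parent), _stable_text(event.get("ts")))
--     canonical: Dict[str, str] = {}
--     for child, counter in parent_counts.items():
--         canonical[child] = sorted(
--             counter.items(),
--             key=lambda item: (-item[1], first_seen.get((child, item[0]), ""), item[0]),
--         )[0][0]
--     return canonical
-- ===== SOURCE B (Python) =====
-- def _stable_text(value):
--     if value in (None, ""):
--         return ""
--     return str(value)
--
-- def _canonical_parent_map(events):
--     # single pass: per child keep {parent: (count, first_ts)} and the current best key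
--     stats = {}
--     for event in events:
--         child = _stable_text(event.get("payload_hash"))
--         parent = _stable_text(event.get("parent_payload_hash"))
--         if not child or not parent:
--             continue
--         ts = _stable_text(event.get("ts"))
--         entry = stats.get(child)
--         if entry is None:
--             stats[child] = ({parent: (1, ts)}, (-1, ts, parent))
--         else:
--             parents, best = entry
--             count, first_ts = parents.get(parent, (0, ts))
--             count += 1
--             parents[parent] = (count, first_ts)
--             key = (-count, first_ts, parent)
--             stats[child] = (parents, key if key < best else best)
--     return {child: pb[1][2] for child, pb in stats.items()}
-- ===== Notes on version B (the rewrite author's own statement) =====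
-- stated objective: alternative
-- what changed: A accumulates per-child counters plus a first-seen map and then runs a second loop that sorts each child's parents by (-count, first_ts, parent) to pick the winner; B does one single pass over the events, maintaining per child the parent stats together with the current best (-count, first_ts, parent) key (replaced only on strict improvement), so the separate selection loop and the per-child sorts disappear.
import Mathlib
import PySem

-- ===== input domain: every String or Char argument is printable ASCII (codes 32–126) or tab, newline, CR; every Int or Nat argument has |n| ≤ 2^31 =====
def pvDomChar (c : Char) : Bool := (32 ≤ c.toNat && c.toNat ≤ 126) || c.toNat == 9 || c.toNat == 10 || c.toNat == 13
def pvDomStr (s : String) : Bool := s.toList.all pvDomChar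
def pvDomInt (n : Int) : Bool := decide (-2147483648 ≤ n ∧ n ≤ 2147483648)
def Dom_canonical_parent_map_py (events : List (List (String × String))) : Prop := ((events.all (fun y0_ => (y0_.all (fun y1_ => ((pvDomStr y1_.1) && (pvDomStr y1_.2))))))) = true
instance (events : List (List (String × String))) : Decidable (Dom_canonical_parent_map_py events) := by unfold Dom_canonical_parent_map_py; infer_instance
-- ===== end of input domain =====

-- B replaces A's accumulate-then-sort-per-child scheme by a single pass that maintains,
-- per child, the parent stats together with the current best (-count, first_ts, parent) key,
-- so the separate selection loop and the per-child sorts disappear (objective: alternative).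

-- shared helper: port of the module helper `_stable_text` (values here are strings)
def stableText (v : Option String) : String :=
  match v with
  | none => ""
  | some s => if s = "" then "" else s

-- shared helper: `event.get(k)` on an association-list dict (first match)
def evGet (event : List (String × String)) (k : String) : Option String :=
  (event.find? (fun p => p.1 == k)).map (fun p => p.2)

-- shared helper: Python's lexicographic `<` on (int, str, str) tuples
def keyLex (k : Int × String × String) : Lex (Int × Lex (String × String)) :=
  toLex (k.1, toLex (k.2.1, k.2.2))

-- ===== PORT A =====
def stepA (acc : PySem.Dict String (PySem.Dict String Int) × PySem.Dict (String × String) String)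
    (event : List (String × String)) :
    PySem.Dict String (PySem.Dict String Int) × PySem.Dict (String × String) String :=
  let child := stableText (evGet event "payload_hash")
  let parent := stableText (evGet event "parent_payload_hash")
  if child = "" ∨ parent = "" then acc
  else
    (acc.1.modify child PySem.Dict.empty (fun ctr => ctr.modify parent 0 (· + 1)),
     acc.2.setdefault (child, parent) (stableText (evGet event "ts")))

def canonical_parent_map_py (events : List (List (String × String))) : List (String × String) :=
  let acc := events.foldl stepA (PySem.Dict.empty, PySem.Dict.empty)
  -- `sorted(...)[0]`: the counter is never empty when this runs, so pyGetD's default is never used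
  (acc.1.items.foldl
    (fun (can : PySem.Dict String String) ci =>
      can.insert ci.1
        (PySem.List.pyGetD
          (PySem.List.sorted ci.2.items
            (fun item => keyLex (-item.2, acc.2.getD (ci.1, item.1) "", item.1)) false)
          0 ("", 0)).1)
    PySem.Dict.empty).items

-- ===== PORT B =====
def stepB (st : PySem.Dict String (PySem.Dict String (Int × String) × (Int × String × String)))
    (event : List (String × String)) :
    PySem.Dict String (PySem.Dict String (Int × String) × (Int × String × String)) :=
  let child := stableText (evGet event "payload_hash")
  let parent := stableText (evGet event "parent_payload_hash")
  if child = "" ∨ parent = "" then st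
  else
    let ts := stableText (evGet event "ts")
    match st.get? child with
    | none => st.insert child (PySem.Dict.insert PySem.Dict.empty parent (1, ts), (-1, ts, parent))
    | some pb =>
      let e := pb.1.getD parent (0, ts)
      let count := e.1 + 1
      let key : Int × String × String := (-count, e.2, parent)
      st.insert child (pb.1.insert parent (count, e.2),
        if keyLex key < keyLex pb.2 then key else pb.2)

def canonical_parent_map_py_alt (events : List (List (String × String))) : List (String × String) :=
  (events.foldl stepB PySem.Dict.empty).items.map (fun cb => (cb.1, cb.2.2.2.2))

-- ===== PRECONDITION & SPEC =====
def Spec_canonical_parent_map_py (events : List (List (String × String))) (out : List (String × String)) : Prop := out = canonical_parent_map_py_alt events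
instance (events : List (List (String × String))) (out : List (String × String)) : Decidable (Spec_canonical_parent_map_py events out) := by unfold Spec_canonical_parent_map_py; infer_instance

-- ===== CLAIM (what is proved, stated in full; the proofs are below) =====
def Claim_equal_canonical_parent_map_py : Prop := ∀ (events : List (List (String × String))), Dom_canonical_parent_map_py events → Spec_canonical_parent_map_py events (canonical_parent_map_py events)

-- ===== LEMMAS AND PROOFS =====

-- A's sort key of a counter item, as a plain triple
def MkKey (fs : PySem.Dict (String × String) String) (c : String) (it : String × Int) :
    Int × String × String :=
  (-it.2, fs.getD (c, it.1) "", it.1)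

-- B's per-parent record corresponding to A's counter item
def EncE (fs : PySem.Dict (String × String) String) (c : String) (it : String × Int) :
    String × (Int × String) :=
  (it.1, (it.2, fs.getD (c, it.1) ""))

-- correspondence between A's (counter, first_seen) and B's (parents, best) for one child
def ChildInv (fs : PySem.Dict (String × String) String) (c : String)
    (ctr : PySem.Dict String Int)
    (e : PySem.Dict String (Int × String) × (Int × String × String)) : Prop :=
  e.1.items = ctr.items.map (EncE fs c) ∧
  ctr.items ≠ [] ∧
  ctr.keys.Nodup ∧
  (∃ it ∈ ctr.items, e.2 = MkKey fs c it) ∧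
  (∀ it ∈ ctr.items, keyLex e.2 ≤ keyLex (MkKey fs c it)) ∧
  (∀ it ∈ ctr.items, (c, it.1) ∈ fs.keys)

-- global loop invariant relating A's state (pc, fs) and B's state st
def ABInv (pc : PySem.Dict String (PySem.Dict String Int))
    (fs : PySem.Dict (String × String) String)
    (st : PySem.Dict String (PySem.Dict String (Int × String) × (Int × String × String))) : Prop :=
  pc.keys.Nodup ∧
  List.Forall₂ (fun a b => a.1 = b.1 ∧ ChildInv fs a.1 a.2 b.2) pc.items st.items ∧
  ∀ cp ∈ fs.keys, ∃ ctr, (cp.1, ctr) ∈ pc.items ∧ cp.2 ∈ ctr.keys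

lemma keyLex_inj {a b : Int × String × String} (h : keyLex a = keyLex b) : a = b := by
  unfold keyLex at h
  have h1 := toLex.injective h
  have h2 : a.1 = b.1 := congrArg Prod.fst h1
  have h3 := toLex.injective (congrArg Prod.snd h1)
  exact Prod.ext h2 (Prod.ext (congrArg Prod.fst h3) (congrArg Prod.snd h3))

lemma find?_some_fst {κ α : Type} [BEq κ] [LawfulBEq κ] {l : List (κ × α)} {k : κ} {a : κ × α}
    (h : l.find? (fun p => p.1 == k) = some a) : a.1 = k ∧ a ∈ l := by
  refine ⟨?_, List.mem_of_find?_eq_some h⟩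
  have := List.find?_some h
  simpa using this

lemma unique_of_nodup {κ α : Type} : ∀ (l : List (κ × α)),
    (l.map Prod.fst).Nodup → ∀ a ∈ l, ∀ b ∈ l, a.1 = b.1 → a = b := by
  intro l
  induction l with
  | nil =>
    intro _ a ha
    cases ha
  | cons x t ih =>
    intro hl a ha b hb hab
    simp only [List.map_cons, List.nodup_cons] at hl
    rcases List.mem_cons.mp ha with rfl | ha' <;> rcases List.mem_cons.mp hb with rfl | hb'
    · rfl
    · exfalso
      apply hl.1
      rw [hab]
      exact List.mem_map_of_mem hb'
    · exfalso
      apply hl.1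
      rw [← hab]
      exact List.mem_map_of_mem ha'
    · exact ih hl.2 a ha' b hb' hab

lemma keys_eq_of_forall₂ {α β : Type} {rel : (String × α) → (String × β) → Prop}
    (hf : ∀ a b, rel a b → a.1 = b.1) :
    ∀ {l₁ : List (String × α)} {l₂ : List (String × β)}, List.Forall₂ rel l₁ l₂ →
      l₁.map Prod.fst = l₂.map Prod.fst := by
  intro l₁ l₂ h
  induction h with
  | nil => rfl
  | cons hab _ ih => simp [hf _ _ hab, ih]

lemma find?_rel {α β : Type} {rel : (String × α) → (String × β) → Prop}
    (hf : ∀ a b, rel a b → a.1 = b.1) :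
    ∀ {l₁ : List (String × α)} {l₂ : List (String × β)}, List.Forall₂ rel l₁ l₂ → ∀ (k : String),
      (l₁.find? (fun p => p.1 == k) = none ∧ l₂.find? (fun p => p.1 == k) = none) ∨
      (∃ a b, l₁.find? (fun p => p.1 == k) = some a ∧ l₂.find? (fun p => p.1 == k) = some b ∧
        rel a b) := by
  intro l₁ l₂ h k
  induction h with
  | nil => exact Or.inl ⟨rfl, rfl⟩
  | cons hab h ih =>
    rename_i a b t₁ t₂
    by_cases hk : a.1 = k
    · exact Or.inr ⟨a, b, by simp [List.find?_cons, hk], by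
        simp [List.find?_cons, (hf _ _ hab ▸ hk : b.1 = k)], hab⟩
    · have hbk : ¬ b.1 = k := (hf _ _ hab) ▸ hk
      rcases ih with ⟨h1, h2⟩ | ⟨x, y, h1, h2, h3⟩
      · exact Or.inl ⟨by simp [List.find?_cons, hk, h1], by simp [List.find?_cons, hbk, h2]⟩
      · exact Or.inr ⟨x, y, by simp [List.find?_cons, hk, h1], by simp [List.find?_cons, hbk, h2], h3⟩

lemma forall₂_append' {α β : Type} {R : α → β → Prop} :
    ∀ {l₁ : List α} {l₂ : List β} {u₁ : List α} {u₂ : List β},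
      List.Forall₂ R l₁ l₂ → List.Forall₂ R u₁ u₂ → List.Forall₂ R (l₁ ++ u₁) (l₂ ++ u₂) := by
  intro l₁ l₂ u₁ u₂ h hu
  induction h with
  | nil => simpa using hu
  | cons hab _ ih => exact List.Forall₂.cons hab ih

lemma forall₂_map {α β α' β' : Type} {rel : α → β → Prop} {rel' : α' → β' → Prop}
    {f : α → α'} {g : β → β'} :
    ∀ {l₁ : List α} {l₂ : List β}, List.Forall₂ rel l₁ l₂ →
      (∀ a b, a ∈ l₁ → b ∈ l₂ → rel a b → rel' (f a) (g b)) →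
      List.Forall₂ rel' (l₁.map f) (l₂.map g) := by
  intro l₁ l₂ h
  induction h with
  | nil =>
    intro _
    exact List.Forall₂.nil
  | @cons a b t₁ t₂ hab htl ih =>
    intro hall
    exact List.Forall₂.cons (hall a b (List.mem_cons_self ..) (List.mem_cons_self ..) hab)
      (ih (fun x y hx hy => hall x y (List.mem_cons_of_mem _ hx) (List.mem_cons_of_mem _ hy)))

lemma map_eq_of_forall₂ {α β γ : Type} {rel : α → β → Prop} {f : α → γ} {g : β → γ} :
    ∀ {l₁ : List α} {l₂ : List β}, List.Forall₂ rel l₁ l₂ →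
      (∀ a b, rel a b → f a = g b) → l₁.map f = l₂.map g := by
  intro l₁ l₂ h hall
  induction h with
  | nil => rfl
  | cons hab _ ih => simp [hall _ _ hab, ih]

-- getD through appending fresh pairs at the end of first_seen
lemma getD_append_of_mem {κ ν : Type} [BEq κ] [LawfulBEq κ] (d : PySem.Dict κ ν)
    (l : List (κ × ν)) (k : κ) (dflt : ν) (h : k ∈ d.keys) :
    (PySem.Dict.mk (d.items ++ l)).getD k dflt = d.getD k dflt := by
  simp only [PySem.Dict.getD, PySem.Dict.get?, PySem.Dict.items, List.find?_append]
  have : (d.items.find? (fun p => p.1 == k)).isSome := by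
    rw [List.find?_isSome]
    simp only [PySem.Dict.keys, List.mem_map] at h
    obtain ⟨p, hp, hpk⟩ := h
    exact ⟨p, hp, by simp [hpk]⟩
  rcases Option.isSome_iff_exists.mp this with ⟨a, ha⟩
  rw [ha]
  rfl

lemma getD_append_self {κ ν : Type} [BEq κ] [LawfulBEq κ] (d : PySem.Dict κ ν)
    (k : κ) (v : ν) (dflt : ν) (h : k ∉ d.keys) :
    (PySem.Dict.mk (d.items ++ [(k, v)])).getD k dflt = v := by
  have hn : d.items.find? (fun p => p.1 == k) = none := by
    rw [List.find?_eq_none]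
    intro p hp he
    apply h
    exact List.mem_map.mpr ⟨p, hp, by simpa using he⟩
  show (Option.map (fun x => x.2) ((d.items ++ [(k, v)]).find? (fun p => p.1 == k))).getD dflt = v
  rw [List.find?_append, hn]
  simp

lemma contains_iff_mem_keys {κ ν : Type} [BEq κ] [LawfulBEq κ] (d : PySem.Dict κ ν) (k : κ) :
    d.contains k = true ↔ k ∈ d.keys := by
  simp [PySem.Dict.contains, PySem.Dict.keys, List.any_eq_true, List.mem_map]

-- ChildInv is stable under appending fresh pairs to first_seen
lemma childInv_fs_append {fs : PySem.Dict (String × String) String} {c : String}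
    {ctr : PySem.Dict String Int}
    {e : PySem.Dict String (Int × String) × (Int × String × String)}
    (h : ChildInv fs c ctr e) (l : List ((String × String) × String)) :
    ChildInv (PySem.Dict.mk (fs.items ++ l)) c ctr e := by
  obtain ⟨h1, h2, h3, ⟨it0, hit0, hbest⟩, h5, h6⟩ := h
  have hgd : ∀ it ∈ ctr.items,
      (PySem.Dict.mk (fs.items ++ l)).getD (c, it.1) "" = fs.getD (c, it.1) "" :=
    fun it hit => getD_append_of_mem fs l (c, it.1) "" (h6 it hit)
  have hmk : ∀ it ∈ ctr.items, MkKey (PySem.Dict.mk (fs.items ++ l)) c it = MkKey fs c it := by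
    intro it hit; unfold MkKey; rw [hgd it hit]
  have henc : ∀ it ∈ ctr.items, EncE (PySem.Dict.mk (fs.items ++ l)) c it = EncE fs c it := by
    intro it hit; unfold EncE; rw [hgd it hit]
  refine ⟨?_, h2, h3, ⟨it0, hit0, by rw [hmk it0 hit0]; exact hbest⟩, ?_, ?_⟩
  · rw [h1]; exact (List.map_congr_left henc).symm
  · intro it hit; rw [hmk it hit]; exact h5 it hit
  · intro it hit
    simp only [PySem.Dict.keys, PySem.Dict.items, List.map_append, List.mem_append]
    exact Or.inl (h6 it hit)

-- keys are unchanged by an overwriting insert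
lemma keys_map_overwrite {κ ν : Type} [BEq κ] [LawfulBEq κ] (l : List (κ × ν)) (k : κ) (v : ν) :
    (l.map (fun p => if p.1 == k then (k, v) else p)).map Prod.fst = l.map Prod.fst := by
  rw [List.map_map]
  apply List.map_congr_left
  intro p _
  by_cases h : p.1 = k <;> simp [h]

-- Python tuple '<' decomposed: a strictly smaller first component wins
lemma keyLex_lt_of_fst_lt {a b : Int × String × String} (h : a.1 < b.1) : keyLex a < keyLex b := by
  unfold keyLex
  exact Prod.Lex.left _ _ h

-- the single-pass best update preserves the per-child correspondence: existing parent
lemma childInv_step_old {fs : PySem.Dict (String × String) String} {c p : String}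
    {ctr : PySem.Dict String Int}
    {parents : PySem.Dict String (Int × String)} {best : Int × String × String}
    (h : ChildInv fs c ctr (parents, best)) (hp : p ∈ ctr.keys)
    (ts : String) (cnt : Int) (fts : String)
    (hgd : parents.getD p (0, ts) = (cnt, fts)) :
    ChildInv fs c (ctr.modify p 0 (· + 1))
      (parents.insert p (cnt + 1, fts),
       if keyLex (-(cnt + 1), fts, p) < keyLex best then (-(cnt + 1), fts, p) else best) := by
  obtain ⟨h1, h2, h3, ⟨it0, hit0, hbest⟩, h5, h6⟩ := h
  dsimp only at h1 hbest h5
  have hfind : (ctr.items.find? (fun q => q.1 == p)).isSome := by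
    rw [List.find?_isSome]
    have hp' : ∃ q ∈ ctr.items, q.1 = p := by
      simpa [PySem.Dict.keys, List.mem_map] using hp
    obtain ⟨q, hq, hqk⟩ := hp'
    exact ⟨q, hq, by simp [hqk]⟩
  obtain ⟨q0, hq0⟩ := Option.isSome_iff_exists.mp hfind
  obtain ⟨hq0p, hq0mem⟩ := find?_some_fst hq0
  have hgdA : ctr.getD p 0 = q0.2 := by
    simp [PySem.Dict.getD, PySem.Dict.get?, hq0]
  have hfindB : parents.items.find? (fun q => q.1 == p) = some (EncE fs c q0) := by
    rw [h1, List.find?_map]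
    have hcomp : (fun (q : String × (Int × String)) => q.1 == p) ∘ EncE fs c
        = fun (it : String × Int) => it.1 == p := rfl
    rw [hcomp, hq0]
    rfl
  have hgdB : parents.getD p (0, ts) = (q0.2, fs.getD (c, p) "") := by
    simp only [PySem.Dict.getD, PySem.Dict.get?, hfindB, Option.map_some, Option.getD_some]
    show (EncE fs c q0).2 = _
    unfold EncE
    dsimp only
    rw [hq0p]
    rfl
  obtain ⟨hcnt, hfts⟩ : cnt = q0.2 ∧ fts = fs.getD (c, p) "" := by
    rw [hgd] at hgdB
    exact ⟨congrArg Prod.fst hgdB, congrArg Prod.snd hgdB⟩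
  rw [hcnt, hfts]
  have hcont : ctr.contains p = true := (contains_iff_mem_keys ctr p).mpr hp
  have hcontB : parents.contains p = true := by
    simp only [PySem.Dict.contains, List.any_eq_true]
    refine ⟨EncE fs c q0, by rw [h1]; exact List.mem_map_of_mem hq0mem, ?_⟩
    show ((EncE fs c q0).1 == p) = true
    simp [EncE, hq0p]
  have hctr' : (ctr.modify p 0 (· + 1)).items
      = ctr.items.map (fun q => if q.1 == p then (p, q0.2 + 1) else q) := by
    simp [PySem.Dict.modify, PySem.Dict.insert, hcont, hgdA]
  have hpar' : (parents.insert p (q0.2 + 1, fs.getD (c, p) "")).items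
      = parents.items.map
          (fun q => if q.1 == p then (p, (q0.2 + 1, fs.getD (c, p) "")) else q) := by
    simp [PySem.Dict.insert, hcontB]
  refine ⟨?_, ?_, ?_, ?_, ?_, ?_⟩
  · -- item correspondence
    dsimp only
    rw [hpar', h1, hctr', List.map_map, List.map_map]
    apply List.map_congr_left
    intro it _
    by_cases hip : it.1 = p
    · have hc : (it.1 == p) = true := beq_iff_eq.mpr hip
      have hcE : (((EncE fs c it).1 == p)) = true := by simp [EncE, hip]
      simp only [Function.comp_apply]
      rw [if_pos hcE, if_pos hc]
      rfl
    · have hc : ¬((it.1 == p) = true) := by simp [hip]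
      have hcE : ¬(((EncE fs c it).1 == p) = true) := by simp [EncE, hip]
      simp only [Function.comp_apply]
      rw [if_neg hcE, if_neg hc]
  · -- nonempty
    rw [hctr']
    simp only [ne_eq, List.map_eq_nil_iff]
    exact h2
  · -- nodup keys
    show ((ctr.modify p 0 (· + 1)).items.map (fun x => x.1)).Nodup
    rw [hctr', keys_map_overwrite]
    exact h3
  · -- the best key is realised by an item of the new counter
    dsimp only
    have hmem' : (p, q0.2 + 1) ∈ (ctr.modify p 0 (· + 1)).items := by
      rw [hctr']
      refine List.mem_map.mpr ⟨q0, hq0mem, ?_⟩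
      have hc : (q0.1 == p) = true := beq_iff_eq.mpr hq0p
      rw [if_pos hc]
    by_cases hlt : keyLex (-(q0.2 + 1), fs.getD (c, p) "", p) < keyLex best
    · exact ⟨(p, q0.2 + 1), hmem', by rw [if_pos hlt]; rfl⟩
    · by_cases hi0 : it0.1 = p
      · exfalso
        apply hlt
        have hiq : it0 = q0 :=
          unique_of_nodup ctr.items h3 it0 hit0 q0 hq0mem (hi0.trans hq0p.symm)
        rw [hbest, hiq]
        have hmk : MkKey fs c q0 = (-q0.2, fs.getD (c, p) "", q0.1) := by
          unfold MkKey
          rw [hq0p]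
        rw [hmk, hq0p]
        apply keyLex_lt_of_fst_lt
        show -(q0.2 + 1) < -q0.2
        omega
      · refine ⟨it0, ?_, ?_⟩
        · rw [hctr']
          refine List.mem_map.mpr ⟨it0, hit0, ?_⟩
          have hc : ¬((it0.1 == p) = true) := by simp [hi0]
          rw [if_neg hc]
        · rw [if_neg hlt]
          exact hbest
  · -- minimality over the new counter
    dsimp only
    intro it' hit'
    rw [hctr'] at hit'
    rcases List.mem_map.mp hit' with ⟨it, hit, rfl⟩
    by_cases hip : it.1 = p
    · have hc : (it.1 == p) = true := beq_iff_eq.mpr hip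
      rw [if_pos hc]
      by_cases hlt : keyLex (-(q0.2 + 1), fs.getD (c, p) "", p) < keyLex best
      · rw [if_pos hlt]
        exact le_of_eq rfl
      · rw [if_neg hlt]
        exact le_of_not_gt hlt
    · have hc : ¬((it.1 == p) = true) := by simp [hip]
      rw [if_neg hc]
      by_cases hlt : keyLex (-(q0.2 + 1), fs.getD (c, p) "", p) < keyLex best
      · rw [if_pos hlt]
        exact le_of_lt (lt_of_lt_of_le hlt (h5 it hit))
      · rw [if_neg hlt]
        exact h5 it hit
  · -- first_seen covers every parent of the new counter
    intro it' hit'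
    rw [hctr'] at hit'
    rcases List.mem_map.mp hit' with ⟨it, hit, rfl⟩
    by_cases hip : it.1 = p
    · have hc : (it.1 == p) = true := beq_iff_eq.mpr hip
      rw [if_pos hc]
      have := h6 q0 hq0mem
      rw [hq0p] at this
      exact this
    · have hc : ¬((it.1 == p) = true) := by simp [hip]
      rw [if_neg hc]
      exact h6 it hit

-- the single-pass best update preserves the per-child correspondence: new parent
lemma childInv_step_new {fs : PySem.Dict (String × String) String} {c p : String}
    {ctr : PySem.Dict String Int}
    {parents : PySem.Dict String (Int × String)} {best : Int × String × String}
    (h : ChildInv fs c ctr (parents, best)) (hp : p ∉ ctr.keys)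
    (hfs : (c, p) ∉ fs.keys) (ts : String) (cnt : Int) (fts : String)
    (hgd : parents.getD p (0, ts) = (cnt, fts)) :
    ChildInv (PySem.Dict.mk (fs.items ++ [((c, p), ts)])) c (ctr.modify p 0 (· + 1))
      (parents.insert p (cnt + 1, fts),
       if keyLex (-(cnt + 1), fts, p) < keyLex best then (-(cnt + 1), fts, p) else best) := by
  have h' := childInv_fs_append h [((c, p), ts)]
  obtain ⟨h1, h2, h3, ⟨it0, hit0, hbest⟩, h5, h6⟩ := h'
  dsimp only at h1 hbest h5
  have hfindA : ctr.items.find? (fun q => q.1 == p) = none := by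
    rw [List.find?_eq_none]
    intro q hq he
    apply hp
    show p ∈ ctr.items.map (fun x => x.1)
    exact List.mem_map.mpr ⟨q, hq, by simpa using he⟩
  have hgdA : ctr.getD p 0 = 0 := by
    simp [PySem.Dict.getD, PySem.Dict.get?, hfindA]
  have hfindB : parents.items.find? (fun q => q.1 == p) = none := by
    rw [h1, List.find?_map]
    have hcomp : (fun (q : String × (Int × String)) => q.1 == p)
        ∘ EncE (PySem.Dict.mk (fs.items ++ [((c, p), ts)])) c
        = fun (it : String × Int) => it.1 == p := rfl
    rw [hcomp, hfindA]
    rfl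
  have hgdB : parents.getD p (0, ts) = (0, ts) := by
    simp [PySem.Dict.getD, PySem.Dict.get?, hfindB]
  obtain ⟨hcnt, hfts⟩ : cnt = 0 ∧ fts = ts := by
    rw [hgd] at hgdB
    exact ⟨congrArg Prod.fst hgdB, congrArg Prod.snd hgdB⟩
  rw [hcnt, hfts]
  show ChildInv _ c (ctr.modify p 0 (· + 1))
    (parents.insert p (1, ts),
     if keyLex (-1, ts, p) < keyLex best then (-1, ts, p) else best)
  have hcont : ctr.contains p = false := by
    rw [← Bool.not_eq_true]
    intro hcb
    exact hp ((contains_iff_mem_keys ctr p).mp hcb)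
  have hcontB : parents.contains p = false := by
    rw [← Bool.not_eq_true]
    simp only [PySem.Dict.contains, List.any_eq_true]
    rintro ⟨q, hq, hqe⟩
    rw [List.find?_eq_none] at hfindB
    exact (hfindB q hq) hqe
  have hctr' : (ctr.modify p 0 (· + 1)).items = ctr.items ++ [(p, 1)] := by
    simp [PySem.Dict.modify, PySem.Dict.insert, hcont, hgdA]
  have hpar' : (parents.insert p (1, ts)).items = parents.items ++ [(p, (1, ts))] := by
    simp [PySem.Dict.insert, hcontB]
  have hgdnew : (PySem.Dict.mk (fs.items ++ [((c, p), ts)])).getD (c, p) "" = ts :=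
    getD_append_self fs (c, p) ts "" hfs
  refine ⟨?_, ?_, ?_, ?_, ?_, ?_⟩
  · dsimp only
    rw [hpar', hctr', h1, List.map_append]
    simp [EncE, hgdnew]
  · rw [hctr']
    simp
  · show ((ctr.modify p 0 (· + 1)).items.map (fun x => x.1)).Nodup
    rw [hctr', List.map_append]
    simp only [List.map_cons, List.map_nil]
    rw [List.nodup_append]
    refine ⟨h3, List.nodup_singleton _, ?_⟩
    intro x hx y hy
    rcases List.mem_singleton.mp hy with rfl
    exact fun heq => hp (heq ▸ hx)
  · dsimp only
    have hmem' : (p, (1 : Int)) ∈ (ctr.modify p 0 (· + 1)).items := by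
      rw [hctr']
      exact List.mem_append_right _ (by simp)
    by_cases hlt : keyLex (-1, ts, p) < keyLex best
    · refine ⟨(p, 1), hmem', ?_⟩
      rw [if_pos hlt]
      simp [MkKey, hgdnew]
    · refine ⟨it0, ?_, ?_⟩
      · rw [hctr']
        exact List.mem_append_left _ hit0
      · rw [if_neg hlt]
        exact hbest
  · dsimp only
    intro it' hit'
    rw [hctr'] at hit'
    rcases List.mem_append.mp hit' with hit | hit
    · by_cases hlt : keyLex (-1, ts, p) < keyLex best
      · rw [if_pos hlt]
        exact le_of_lt (lt_of_lt_of_le hlt (h5 it' hit))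
      · rw [if_neg hlt]
        exact h5 it' hit
    · rcases List.mem_singleton.mp hit with rfl
      have hmk : MkKey (PySem.Dict.mk (fs.items ++ [((c, p), ts)])) c (p, (1 : Int))
          = (-1, ts, p) := by
        simp [MkKey, hgdnew]
      rw [hmk]
      by_cases hlt : keyLex (-1, ts, p) < keyLex best
      · rw [if_pos hlt]
      · rw [if_neg hlt]
        exact le_of_not_gt hlt
  · intro it' hit'
    rw [hctr'] at hit'
    rcases List.mem_append.mp hit' with hit | hit
    · exact h6 it' hit
    · rcases List.mem_singleton.mp hit with rfl
      show (c, p) ∈ (PySem.Dict.mk (fs.items ++ [((c, p), ts)])).keys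
      show (c, p) ∈ (fs.items ++ [((c, p), ts)]).map (fun x => x.1)
      rw [List.map_append]
      exact List.mem_append_right _ (by simp)

-- one event preserves the invariant
lemma ab_inv_step (pc : PySem.Dict String (PySem.Dict String Int))
    (fs : PySem.Dict (String × String) String)
    (st : PySem.Dict String (PySem.Dict String (Int × String) × (Int × String × String)))
    (ev : List (String × String)) (h : ABInv pc fs st) :
    ABInv (stepA (pc, fs) ev).1 (stepA (pc, fs) ev).2 (stepB st ev) := by
  obtain ⟨hnd, hrel, hcov⟩ := h
  unfold stepA stepB
  set child := stableText (evGet ev "payload_hash") with hch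
  set parent := stableText (evGet ev "parent_payload_hash") with hpa
  set ts := stableText (evGet ev "ts") with hts
  by_cases hguard : child = "" ∨ parent = ""
  · simp only [hguard, if_true]
    exact ⟨hnd, hrel, hcov⟩
  simp only [hguard, if_false]
  have hfst : ∀ (a : String × PySem.Dict String Int)
      (b : String × (PySem.Dict String (Int × String) × (Int × String × String))),
      (a.1 = b.1 ∧ ChildInv fs a.1 a.2 b.2) → a.1 = b.1 := fun _ _ hab => hab.1
  rcases find?_rel hfst hrel child with ⟨hfa, hfb⟩ | ⟨a, b, hfa, hfb, hab⟩
  · -- child unseen: both sides append a fresh entry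
    have hget : st.get? child = none := by simp [PySem.Dict.get?, hfb]
    rw [hget]
    have hchildnotin : child ∉ pc.keys := by
      rw [List.find?_eq_none] at hfa
      show child ∉ pc.items.map (fun x => x.1)
      intro hmem
      rcases List.mem_map.mp hmem with ⟨q, hq, hqe⟩
      exact (hfa q hq) (beq_iff_eq.mpr hqe)
    have hpccont : pc.contains child = false := by
      rw [← Bool.not_eq_true]
      intro hc
      exact hchildnotin ((contains_iff_mem_keys pc child).mp hc)
    have hstcont : st.contains child = false := by
      rw [← Bool.not_eq_true]
      simp only [PySem.Dict.contains, List.any_eq_true]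
      rintro ⟨q, hq, hqe⟩
      rw [List.find?_eq_none] at hfb
      exact (hfb q hq) hqe
    have hfsnotin : (child, parent) ∉ fs.keys := by
      intro hin
      obtain ⟨ctr, hctr, _⟩ := hcov (child, parent) hin
      exact hchildnotin (List.mem_map.mpr ⟨(child, ctr), hctr, rfl⟩)
    have hfscont : fs.contains (child, parent) = false := by
      rw [← Bool.not_eq_true]
      intro hc
      exact hfsnotin ((contains_iff_mem_keys fs (child, parent)).mp hc)
    have hgd : pc.getD child PySem.Dict.empty = PySem.Dict.empty := by
      simp [PySem.Dict.getD, PySem.Dict.get?, hfa]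
    have hpc' : (pc.modify child PySem.Dict.empty
        (fun ctr => ctr.modify parent 0 (· + 1))).items
        = pc.items ++ [(child, PySem.Dict.mk [(parent, 1)])] := by
      unfold PySem.Dict.modify PySem.Dict.insert
      rw [hgd, hpccont]
      simp only [Bool.false_eq_true, if_false]
      rfl
    have hsd : fs.setdefault (child, parent) ts
        = PySem.Dict.mk (fs.items ++ [((child, parent), ts)]) := by
      simp [PySem.Dict.setdefault, hfscont]
    have hst' : (st.insert child
        (PySem.Dict.insert PySem.Dict.empty parent (1, ts), (-1, ts, parent))).items
        = st.items ++ [(child, (PySem.Dict.mk [(parent, (1, ts))], (-1, ts, parent)))] := by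
      unfold PySem.Dict.insert
      rw [hstcont]
      simp only [Bool.false_eq_true, if_false]
      rfl
    refine ⟨?_, ?_, ?_⟩
    · -- nodup
      show ((pc.modify child PySem.Dict.empty
        (fun ctr => ctr.modify parent 0 (· + 1))).items.map (fun x => x.1)).Nodup
      rw [hpc', List.map_append]
      simp only [List.map_cons, List.map_nil]
      rw [List.nodup_append]
      refine ⟨hnd, List.nodup_singleton _, ?_⟩
      intro x hx y hy
      rcases List.mem_singleton.mp hy with rfl
      exact fun heq => hchildnotin (heq ▸ hx)
    · -- Forall₂
      show List.Forall₂ _ (pc.modify child PySem.Dict.empty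
        (fun ctr => ctr.modify parent 0 (· + 1))).items
        (st.insert child (PySem.Dict.insert PySem.Dict.empty parent (1, ts),
          (-1, ts, parent))).items
      rw [hpc', hst', hsd]
      apply forall₂_append'
      · exact hrel.imp (fun a b hab => ⟨hab.1, childInv_fs_append hab.2 _⟩)
      · refine List.Forall₂.cons ⟨rfl, ?_⟩ List.Forall₂.nil
        have hgdnew : (PySem.Dict.mk (fs.items ++ [((child, parent), ts)])).getD
            (child, parent) "" = ts := getD_append_self fs (child, parent) ts "" hfsnotin
        refine ⟨by simp [EncE, hgdnew], by simp, by simp [PySem.Dict.keys], ?_, ?_, ?_⟩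
        · exact ⟨(parent, 1), by simp, by simp [MkKey, hgdnew]⟩
        · intro it hit
          rcases List.mem_singleton.mp hit with rfl
          simp [MkKey, hgdnew]
        · intro it hit
          rcases List.mem_singleton.mp hit with rfl
          show (child, parent) ∈ (fs.items ++ [((child, parent), ts)]).map (fun x => x.1)
          rw [List.map_append]
          exact List.mem_append_right _ (by simp)
    · -- coverage
      intro cp hcp
      rw [hsd] at hcp
      have hcp' : cp ∈ fs.keys ∨ cp = (child, parent) := by
        have : cp ∈ (fs.items ++ [((child, parent), ts)]).map (fun x => x.1) := hcp
        rw [List.map_append, List.mem_append] at this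
        rcases this with hh | hh
        · exact Or.inl hh
        · exact Or.inr (by simpa using hh)
      rcases hcp' with hcp' | rfl
      · obtain ⟨ctr, hctr, hmem⟩ := hcov cp hcp'
        exact ⟨ctr, by rw [hpc']; exact List.mem_append_left _ hctr, hmem⟩
      · refine ⟨PySem.Dict.mk [(parent, 1)], ?_, ?_⟩
        · rw [hpc']
          exact List.mem_append_right _ (by simp)
        · show parent ∈ [(parent, (1 : Int))].map (fun x => x.1)
          simp
  · -- child already present
    obtain ⟨haeq, hchild⟩ := hab
    obtain ⟨hafst, hamem⟩ := find?_some_fst hfa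
    obtain ⟨hbfst, hbmem⟩ := find?_some_fst hfb
    have hget : st.get? child = some b.2 := by simp [PySem.Dict.get?, hfb]
    rw [hget]
    have hchildin : child ∈ pc.keys :=
      List.mem_map.mpr ⟨a, hamem, hafst⟩
    have hpccont : pc.contains child = true := (contains_iff_mem_keys pc child).mpr hchildin
    have hstcont : st.contains child = true := by
      apply (contains_iff_mem_keys st child).mpr
      exact List.mem_map.mpr ⟨b, hbmem, hbfst⟩
    have hgd : pc.getD child PySem.Dict.empty = a.2 := by
      simp [PySem.Dict.getD, PySem.Dict.get?, hfa]
    have hstkeys : st.keys.Nodup := by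
      have hke := keys_eq_of_forall₂ hfst hrel
      show (st.items.map (fun x => x.1)).Nodup
      rw [show (st.items.map (fun x => x.1)) = st.items.map Prod.fst from rfl, ← hke]
      exact hnd
    have hauniq : ∀ x ∈ pc.items, x.1 = child → x = a :=
      fun x hx hxp => unique_of_nodup pc.items hnd x hx a hamem (by rw [hxp, hafst])
    have hbuniq : ∀ x ∈ st.items, x.1 = child → x = b :=
      fun x hx hxp => unique_of_nodup st.items hstkeys x hx b hbmem (by rw [hxp, hbfst])
    have hchild' : ChildInv fs child a.2 b.2 := hafst ▸ hchild
    -- abbreviations for the updated per-child data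
    show ABInv (pc.modify child PySem.Dict.empty (fun ctr => ctr.modify parent 0 (· + 1)))
      (fs.setdefault (child, parent) ts)
      (st.insert child (b.2.1.insert parent
          ((b.2.1.getD parent (0, ts)).1 + 1, (b.2.1.getD parent (0, ts)).2),
        if keyLex (-((b.2.1.getD parent (0, ts)).1 + 1), (b.2.1.getD parent (0, ts)).2, parent) <
             keyLex b.2.2
        then (-((b.2.1.getD parent (0, ts)).1 + 1), (b.2.1.getD parent (0, ts)).2, parent)
        else b.2.2))
    have hpc' : (pc.modify child PySem.Dict.empty
        (fun ctr => ctr.modify parent 0 (· + 1))).items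
        = pc.items.map (fun q => if q.1 == child
            then (child, a.2.modify parent 0 (· + 1)) else q) := by
      unfold PySem.Dict.modify PySem.Dict.insert
      rw [hgd, hpccont]
      simp only [eq_self_iff_true, if_true]
    have hst' : (st.insert child (b.2.1.insert parent
          ((b.2.1.getD parent (0, ts)).1 + 1, (b.2.1.getD parent (0, ts)).2),
        if keyLex (-((b.2.1.getD parent (0, ts)).1 + 1), (b.2.1.getD parent (0, ts)).2, parent) <
             keyLex b.2.2
        then (-((b.2.1.getD parent (0, ts)).1 + 1), (b.2.1.getD parent (0, ts)).2, parent)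
        else b.2.2)).items
        = st.items.map (fun q => if q.1 == child
            then (child, (b.2.1.insert parent
                ((b.2.1.getD parent (0, ts)).1 + 1, (b.2.1.getD parent (0, ts)).2),
              if keyLex (-((b.2.1.getD parent (0, ts)).1 + 1),
                    (b.2.1.getD parent (0, ts)).2, parent) < keyLex b.2.2
              then (-((b.2.1.getD parent (0, ts)).1 + 1),
                    (b.2.1.getD parent (0, ts)).2, parent)
              else b.2.2)) else q) := by
      unfold PySem.Dict.insert
      rw [hstcont]
      simp only [eq_self_iff_true, if_true]
    by_cases hpin : parent ∈ a.2.keys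
    · -- existing parent: first_seen unchanged
      have hfsin : (child, parent) ∈ fs.keys := by
        obtain ⟨-, -, -, -, -, h6⟩ := hchild'
        have hp' : ∃ q ∈ a.2.items, q.1 = parent := by
          simpa [PySem.Dict.keys, List.mem_map] using hpin
        obtain ⟨q, hq, hqk⟩ := hp'
        have := h6 q hq
        rw [hqk] at this
        exact this
      have hfscont : fs.contains (child, parent) = true :=
        (contains_iff_mem_keys fs (child, parent)).mpr hfsin
      have hsd : fs.setdefault (child, parent) ts = fs := by
        simp [PySem.Dict.setdefault, hfscont]
      rw [hsd]
      have hinv' : ChildInv fs child (a.2.modify parent 0 (· + 1))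
          (b.2.1.insert parent
              ((b.2.1.getD parent (0, ts)).1 + 1, (b.2.1.getD parent (0, ts)).2),
            if keyLex (-((b.2.1.getD parent (0, ts)).1 + 1),
                  (b.2.1.getD parent (0, ts)).2, parent) < keyLex b.2.2
            then (-((b.2.1.getD parent (0, ts)).1 + 1),
                  (b.2.1.getD parent (0, ts)).2, parent)
            else b.2.2) :=
        childInv_step_old hchild' hpin ts _ _ rfl
      refine ⟨?_, ?_, ?_⟩
      · show ((pc.modify child PySem.Dict.empty
          (fun ctr => ctr.modify parent 0 (· + 1))).items.map (fun x => x.1)).Nodup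
        rw [hpc', keys_map_overwrite]
        exact hnd
      · show List.Forall₂ _ _ _
        rw [hpc', hst']
        apply forall₂_map hrel
        intro x y hx hy hxy
        by_cases hxc : x.1 = child
        · have hyc : y.1 = child := hxy.1 ▸ hxc
          have hcx : (x.1 == child) = true := beq_iff_eq.mpr hxc
          have hcy : (y.1 == child) = true := beq_iff_eq.mpr hyc
          rw [if_pos hcx, if_pos hcy]
          have hxa : x = a := hauniq x hx hxc
          have hyb : y = b := hbuniq y hy hyc
          subst hxa
          subst hyb
          exact ⟨rfl, hinv'⟩
        · have hyc : ¬ y.1 = child := hxy.1 ▸ hxc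
          have hcx : ¬((x.1 == child) = true) := by simp [hxc]
          have hcy : ¬((y.1 == child) = true) := by simp [hyc]
          rw [if_neg hcx, if_neg hcy]
          exact hxy
      · intro cp hcp
        obtain ⟨ctr0, hctr0, hmem0⟩ := hcov cp hcp
        have hkeys' : (a.2.modify parent 0 (· + 1)).keys = a.2.keys := by
          have hcont2 : a.2.contains parent = true :=
            (contains_iff_mem_keys a.2 parent).mpr hpin
          show ((a.2.modify parent 0 (· + 1)).items.map (fun x => x.1))
            = (a.2.items.map (fun x => x.1))
          have : (a.2.modify parent 0 (· + 1)).items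
              = a.2.items.map (fun q => if q.1 == parent
                  then (parent, a.2.getD parent 0 + 1) else q) := by
            simp [PySem.Dict.modify, PySem.Dict.insert, hcont2]
          rw [this, keys_map_overwrite]
        by_cases hc0 : cp.1 = child
        · have hea : (cp.1, ctr0) = a := hauniq _ hctr0 hc0
          have hctr0a : ctr0 = a.2 := congrArg Prod.snd hea
          refine ⟨a.2.modify parent 0 (· + 1), ?_, ?_⟩
          · rw [hpc']
            refine List.mem_map.mpr ⟨(cp.1, ctr0), hctr0, ?_⟩
            have hcc : ((cp.1, ctr0).1 == child) = true := beq_iff_eq.mpr hc0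
            rw [if_pos hcc]
            rw [hc0]
          · rw [hkeys', ← hctr0a]
            exact hmem0
        · refine ⟨ctr0, ?_, hmem0⟩
          rw [hpc']
          refine List.mem_map.mpr ⟨(cp.1, ctr0), hctr0, ?_⟩
          have hcc : ¬(((cp.1, ctr0).1 == child) = true) := by simp [hc0]
          rw [if_neg hcc]
    · -- new parent for an existing child: first_seen gains one pair
      have hfsnotin : (child, parent) ∉ fs.keys := by
        intro hin
        obtain ⟨ctr0, hctr0, hmem0⟩ := hcov (child, parent) hin
        have hea : (child, ctr0) = a := hauniq _ hctr0 rfl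
        exact hpin (congrArg Prod.snd hea ▸ hmem0)
      have hfscont : fs.contains (child, parent) = false := by
        rw [← Bool.not_eq_true]
        intro hc
        exact hfsnotin ((contains_iff_mem_keys fs (child, parent)).mp hc)
      have hsd : fs.setdefault (child, parent) ts
          = PySem.Dict.mk (fs.items ++ [((child, parent), ts)]) := by
        simp [PySem.Dict.setdefault, hfscont]
      rw [hsd]
      have hinv' : ChildInv (PySem.Dict.mk (fs.items ++ [((child, parent), ts)])) child
          (a.2.modify parent 0 (· + 1))
          (b.2.1.insert parent
              ((b.2.1.getD parent (0, ts)).1 + 1, (b.2.1.getD parent (0, ts)).2),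
            if keyLex (-((b.2.1.getD parent (0, ts)).1 + 1),
                  (b.2.1.getD parent (0, ts)).2, parent) < keyLex b.2.2
            then (-((b.2.1.getD parent (0, ts)).1 + 1),
                  (b.2.1.getD parent (0, ts)).2, parent)
            else b.2.2) :=
        childInv_step_new hchild' hpin hfsnotin ts _ _ rfl
      have hcont2 : a.2.contains parent = false := by
        rw [← Bool.not_eq_true]
        intro hc
        exact hpin ((contains_iff_mem_keys a.2 parent).mp hc)
      have hgdp : a.2.getD parent 0 = 0 := by
        simp only [PySem.Dict.getD, PySem.Dict.get?]
        rw [List.find?_eq_none.mpr]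
        · rfl
        · intro q hq he
          apply hpin
          show parent ∈ a.2.items.map (fun x => x.1)
          exact List.mem_map.mpr ⟨q, hq, by simpa using he⟩
      have hkeys' : (a.2.modify parent 0 (· + 1)).keys = a.2.keys ++ [parent] := by
        show ((a.2.modify parent 0 (· + 1)).items.map (fun x => x.1))
          = (a.2.items.map (fun x => x.1)) ++ [parent]
        simp [PySem.Dict.modify, PySem.Dict.insert, hcont2, hgdp]
      refine ⟨?_, ?_, ?_⟩
      · show ((pc.modify child PySem.Dict.empty
          (fun ctr => ctr.modify parent 0 (· + 1))).items.map (fun x => x.1)).Nodup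
        rw [hpc', keys_map_overwrite]
        exact hnd
      · show List.Forall₂ _ _ _
        rw [hpc', hst']
        apply forall₂_map hrel
        intro x y hx hy hxy
        by_cases hxc : x.1 = child
        · have hyc : y.1 = child := hxy.1 ▸ hxc
          have hcx : (x.1 == child) = true := beq_iff_eq.mpr hxc
          have hcy : (y.1 == child) = true := beq_iff_eq.mpr hyc
          rw [if_pos hcx, if_pos hcy]
          have hxa : x = a := hauniq x hx hxc
          have hyb : y = b := hbuniq y hy hyc
          subst hxa
          subst hyb
          exact ⟨rfl, hinv'⟩
        · have hyc : ¬ y.1 = child := hxy.1 ▸ hxc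
          have hcx : ¬((x.1 == child) = true) := by simp [hxc]
          have hcy : ¬((y.1 == child) = true) := by simp [hyc]
          rw [if_neg hcx, if_neg hcy]
          exact ⟨hxy.1, childInv_fs_append hxy.2 _⟩
      · intro cp hcp
        have hcp' : cp ∈ fs.keys ∨ cp = (child, parent) := by
          have : cp ∈ (fs.items ++ [((child, parent), ts)]).map (fun x => x.1) := hcp
          rw [List.map_append, List.mem_append] at this
          rcases this with hh | hh
          · exact Or.inl hh
          · exact Or.inr (by simpa using hh)
        rcases hcp' with hcp' | rfl
        · obtain ⟨ctr0, hctr0, hmem0⟩ := hcov cp hcp'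
          by_cases hc0 : cp.1 = child
          · have hea : (cp.1, ctr0) = a := hauniq _ hctr0 hc0
            have hctr0a : ctr0 = a.2 := congrArg Prod.snd hea
            refine ⟨a.2.modify parent 0 (· + 1), ?_, ?_⟩
            · rw [hpc']
              refine List.mem_map.mpr ⟨(cp.1, ctr0), hctr0, ?_⟩
              have hcc : ((cp.1, ctr0).1 == child) = true := beq_iff_eq.mpr hc0
              rw [if_pos hcc, hc0]
            · rw [hkeys']
              exact List.mem_append_left _ (hctr0a ▸ hmem0)
          · refine ⟨ctr0, ?_, hmem0⟩
            rw [hpc']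
            refine List.mem_map.mpr ⟨(cp.1, ctr0), hctr0, ?_⟩
            have hcc : ¬(((cp.1, ctr0).1 == child) = true) := by simp [hc0]
            rw [if_neg hcc]
        · refine ⟨a.2.modify parent 0 (· + 1), ?_, ?_⟩
          · rw [hpc']
            refine List.mem_map.mpr ⟨a, hamem, ?_⟩
            have hcc : (a.1 == child) = true := beq_iff_eq.mpr hafst
            rw [if_pos hcc]
          · rw [hkeys']
            exact List.mem_append_right _ (by simp)

-- the invariant holds after folding any event list
lemma ab_inv_fold (events : List (List (String × String))) :
    ∀ pc fs st, ABInv pc fs st →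
      ABInv (events.foldl stepA (pc, fs)).1 (events.foldl stepA (pc, fs)).2
        (events.foldl stepB st) := by
  induction events with
  | nil => intro pc fs st h; exact h
  | cons ev t ih =>
    intro pc fs st h
    have hstep := ab_inv_step pc fs st ev h
    have := ih (stepA (pc, fs) ev).1 (stepA (pc, fs) ev).2 (stepB st ev)
    simp only [List.foldl_cons] at *
    exact this hstep

-- A's selection (head of the sorted counter items) returns exactly B's stored best parent
lemma sel_eq (fs : PySem.Dict (String × String) String) (c : String)
    (ctr : PySem.Dict String Int)
    (e : PySem.Dict String (Int × String) × (Int × String × String))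
    (h : ChildInv fs c ctr e) :
    (PySem.List.pyGetD
      (PySem.List.sorted ctr.items
        (fun item => keyLex (-item.2, fs.getD (c, item.1) "", item.1)) false)
      0 ("", 0)).1 = e.2.2.2 := by
  obtain ⟨-, h2, -, ⟨it0, hit0, hbest⟩, h5, -⟩ := h
  set key := fun (item : String × Int) => keyLex (-item.2, fs.getD (c, item.1) "", item.1)
    with hkeydef
  have hne : PySem.List.sorted ctr.items key false ≠ [] := by
    rw [ne_eq, PySem.List.sorted_eq_nil_iff]
    exact h2
  rcases hsrt : PySem.List.sorted ctr.items key false with _ | ⟨m, t⟩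
  · exact absurd hsrt hne
  have hmmem : m ∈ ctr.items := by
    have hm : m ∈ PySem.List.sorted ctr.items key false := by
      rw [hsrt]
      simp
    exact (PySem.List.mem_sorted ctr.items key false m).mp hm
  have hmin : ∀ y ∈ ctr.items, key m ≤ key y :=
    PySem.List.key_head_sorted_le (xs := ctr.items) (key := key) hsrt
  have hle1 : key m ≤ keyLex e.2 := by
    rw [hbest]
    exact hmin it0 hit0
  have hle2 : keyLex e.2 ≤ key m := h5 m hmmem
  have heq : MkKey fs c m = e.2 := keyLex_inj (le_antisymm hle1 hle2)
  rw [PySem.List.pyGetD_zero_cons]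
  exact congrArg (fun k => k.2.2) heq

-- building a dict by inserting pairwise-fresh keys just appends the pairs
lemma foldl_insert_items {α : Type} (sel : String × α → String) :
    ∀ (l : List (String × α)) (acc : PySem.Dict String String),
      (l.map Prod.fst).Nodup → (∀ x ∈ l, acc.contains x.1 = false) →
      (l.foldl (fun can x => can.insert x.1 (sel x)) acc).items
        = acc.items ++ l.map (fun x => (x.1, sel x)) := by
  intro l
  induction l with
  | nil =>
    intro acc _ _
    simp
  | cons x t ih =>
    intro acc hnd hfresh
    simp only [List.map_cons, List.nodup_cons] at hnd
    have hx : acc.contains x.1 = false := hfresh x (List.mem_cons_self ..)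
    have hins : (acc.insert x.1 (sel x)).items = acc.items ++ [(x.1, sel x)] := by
      simp [PySem.Dict.insert, hx]
    have hfresh' : ∀ y ∈ t, (acc.insert x.1 (sel x)).contains y.1 = false := by
      intro y hy
      rw [← Bool.not_eq_true]
      simp only [PySem.Dict.contains, List.any_eq_true, hins, List.mem_append]
      rintro ⟨q, hq | hq, hqe⟩
      · have hcy : acc.contains y.1 = true := by
          simp only [PySem.Dict.contains, List.any_eq_true]
          exact ⟨q, hq, hqe⟩
        rw [hfresh y (List.mem_cons_of_mem _ hy)] at hcy
        exact Bool.false_ne_true hcy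
      · rcases List.mem_singleton.mp hq with rfl
        have : x.1 = y.1 := by simpa using hqe
        apply hnd.1
        rw [this]
        exact List.mem_map_of_mem hy
    rw [List.foldl_cons, ih (acc.insert x.1 (sel x)) hnd.2 hfresh', hins, List.map_cons]
    simp

-- the two final output builders agree under the invariant
lemma out_eq (pc : PySem.Dict String (PySem.Dict String Int))
    (fs : PySem.Dict (String × String) String)
    (st : PySem.Dict String (PySem.Dict String (Int × String) × (Int × String × String)))
    (h : ABInv pc fs st) :
    (pc.items.foldl
      (fun (can : PySem.Dict String String) ci =>
        can.insert ci.1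
          (PySem.List.pyGetD
            (PySem.List.sorted ci.2.items
              (fun item => keyLex (-item.2, fs.getD (ci.1, item.1) "", item.1)) false)
            0 ("", 0)).1)
      PySem.Dict.empty).items
    = st.items.map (fun cb => (cb.1, cb.2.2.2.2)) := by
  obtain ⟨hnd, hrel, -⟩ := h
  have hfold := foldl_insert_items (α := PySem.Dict String Int)
    (fun ci => (PySem.List.pyGetD
      (PySem.List.sorted ci.2.items
        (fun item => keyLex (-item.2, fs.getD (ci.1, item.1) "", item.1)) false)
      0 ("", 0)).1)
    pc.items PySem.Dict.empty hnd
    (fun x _ => by simp [PySem.Dict.contains, PySem.Dict.empty])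
  rw [hfold]
  show List.map _ pc.items = _
  apply map_eq_of_forall₂ hrel
  intro a b hab
  obtain ⟨h1, h2⟩ := hab
  show (a.1, (PySem.List.pyGetD
      (PySem.List.sorted a.2.items
        (fun item => keyLex (-item.2, fs.getD (a.1, item.1) "", item.1)) false)
      0 ("", 0)).1) = (b.1, b.2.2.2.2)
  have hsel := sel_eq fs a.1 a.2 b.2 h2
  rw [h1] at hsel ⊢
  simp only [Prod.mk.injEq]
  exact ⟨trivial, hsel⟩

-- ===== VERDICT (by name: the statement is the Claim_ definition above) =====
theorem canonical_parent_map_py_spec : Claim_equal_canonical_parent_map_py := by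
  intro events _
  show canonical_parent_map_py events = canonical_parent_map_py_alt events
  unfold canonical_parent_map_py canonical_parent_map_py_alt
  have habinv0 : ABInv PySem.Dict.empty PySem.Dict.empty PySem.Dict.empty :=
    ⟨by simp [PySem.Dict.keys, PySem.Dict.empty], List.Forall₂.nil, by
      intro cp hcp
      simp [PySem.Dict.keys, PySem.Dict.empty] at hcp⟩
  have habinv := ab_inv_fold events PySem.Dict.empty PySem.Dict.empty PySem.Dict.empty habinv0
  exact out_eq _ _ _ habinv
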